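-- pv_equiv track=rewrite | github.com/RudeBoyOne/lfn-shell | clipboard/components/render_utils.py | compute_computed_item_height
-- ===== SOURCE A (Python) =====
-- from typing import List, Tuple
--
-- def compute_computed_item_height(
--     render_candidates: List[Tuple[int, str, str]],
--     item_width: int,
--     base_item_height: int,
-- ) -> int:
--     """Compute a suggested item height based on text lengths and image presence.
--
--     render_candidates: list of (orig_idx, item_id, content)
--     returns the computed item height in pixels.
--     """
--     max_text_lines = 0
--     if render_candidates:
--         chars_per_line = max(20, max(10, item_width // 8))
--         for _, _, content in render_candidates:
--             if not content:
--                 continue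
--             display_len = len((content or "").strip())
--             lines = min(6, max(1, (display_len // chars_per_line) + 1))
--             if lines > max_text_lines:
--                 max_text_lines = lines
--     if max_text_lines > 1:
--         line_height = 18
--         computed_item_height = max(base_item_height, max_text_lines * line_height + 24)
--     else:
--         computed_item_height = base_item_height
--     return computed_item_height
-- ===== SOURCE B (Python) =====
-- def compute_computed_item_height(render_candidates, item_width, base_item_height):
--     chars_per_line = max(20, max(10, item_width // 8))
--     for lines in range(6, 1, -1):
--         threshold = (lines - 1) * chars_per_line
--         if any(content and len(content.strip()) >= threshold
--                for _, _, content in render_candidates):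
--             return max(base_item_height, lines * 18 + 24)
--     return base_item_height
-- ===== Notes on version B (the rewrite author's own statement) =====
-- stated objective: alternative
-- what changed: Instead of A's per-item clamp-and-running-max loop, B searches the five possible multi-line counts k=6..2 in descending order and returns at the first k whose character threshold (k-1)*chars_per_line is reached by some truthy stripped content; no per-item line count or maximum is ever computed.
import Mathlib
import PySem

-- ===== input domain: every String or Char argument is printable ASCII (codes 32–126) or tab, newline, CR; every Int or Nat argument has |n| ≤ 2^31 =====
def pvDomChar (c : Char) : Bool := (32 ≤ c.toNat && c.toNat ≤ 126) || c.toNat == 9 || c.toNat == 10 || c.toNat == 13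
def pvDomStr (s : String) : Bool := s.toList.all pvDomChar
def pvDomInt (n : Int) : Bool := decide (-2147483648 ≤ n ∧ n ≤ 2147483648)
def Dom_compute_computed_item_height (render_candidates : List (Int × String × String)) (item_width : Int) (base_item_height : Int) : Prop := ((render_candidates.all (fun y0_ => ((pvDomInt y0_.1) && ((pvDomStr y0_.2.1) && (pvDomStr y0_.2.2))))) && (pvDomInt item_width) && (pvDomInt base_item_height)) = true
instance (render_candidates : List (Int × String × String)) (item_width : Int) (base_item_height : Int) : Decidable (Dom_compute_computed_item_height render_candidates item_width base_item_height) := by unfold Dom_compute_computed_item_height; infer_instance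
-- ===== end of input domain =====

-- B replaces A's per-item clamp-and-running-max loop by a descending search over the five
-- possible multi-line counts k=6..2, returning at the first k whose character threshold some
-- truthy stripped content reaches; objective: alternative (same cost, different algorithm).

-- ===== PORT A =====
def compute_computed_item_height (render_candidates : List (Int × String × String)) (item_width : Int) (base_item_height : Int) : Int :=
  let max_text_lines : Int :=
    if render_candidates ≠ [] then
      let chars_per_line : Int := max 20 (max 10 (PySem.Int.floordiv item_width 8))
      render_candidates.foldl (fun m t =>
        if t.2.2 = "" then m
        else
          let display_len : Int := (PySem.Str.len (PySem.Str.strip t.2.2) : Int)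
          let lines : Int := min 6 (max 1 (PySem.Int.floordiv display_len chars_per_line + 1))
          if lines > m then lines else m) 0
    else 0
  if max_text_lines > 1 then
    let line_height : Int := 18
    max base_item_height (max_text_lines * line_height + 24)
  else base_item_height

-- ===== PORT B =====
-- `content and len(content.strip()) >= threshold` for one candidate
def pvAnyLong (rcs : List (Int × String × String)) (thr : Int) : Bool :=
  rcs.any (fun t => decide (t.2.2 ≠ "") && decide (thr ≤ (PySem.Str.len (PySem.Str.strip t.2.2) : Int)))

def compute_computed_item_height_alt (render_candidates : List (Int × String × String)) (item_width : Int) (base_item_height : Int) : Int :=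
  let chars_per_line : Int := max 20 (max 10 (PySem.Int.floordiv item_width 8))
  -- for lines in range(6, 1, -1): if any(...): return max(base, lines*18+24)
  match (PySem.List.pyRange 6 1 (-1)).find?
      (fun lines => pvAnyLong render_candidates ((lines - 1) * chars_per_line)) with
  | some lines => max base_item_height (lines * 18 + 24)
  | none => base_item_height

-- ===== PRECONDITION & SPEC =====
def Spec_compute_computed_item_height (render_candidates : List (Int × String × String)) (item_width : Int) (base_item_height : Int) (out : Int) : Prop := out = compute_computed_item_height_alt render_candidates item_width base_item_height
instance (render_candidates : List (Int × String × String)) (item_width : Int) (base_item_height : Int) (out : Int) : Decidable (Spec_compute_computed_item_height render_candidates item_width base_item_height out) := by unfold Spec_compute_computed_item_height; infer_instance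

-- ===== CLAIM =====
def Claim_equal_compute_computed_item_height : Prop := ∀ (render_candidates : List (Int × String × String)) (item_width : Int) (base_item_height : Int), Dom_compute_computed_item_height render_candidates item_width base_item_height → Spec_compute_computed_item_height render_candidates item_width base_item_height (compute_computed_item_height render_candidates item_width base_item_height)

-- ===== LEMMAS AND PROOFS =====

def pvClamp (c x : Int) : Int := min 6 (max 1 (PySem.Int.floordiv x c + 1))

theorem pvClamp_mono (c : Int) (hc : 0 < c) {a b : Int} (h : a ≤ b) :
    pvClamp c a ≤ pvClamp c b := by
  unfold pvClamp
  have := Int.ediv_le_ediv hc h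
  rw [PySem.Int.floordiv_eq_ediv_of_pos hc, PySem.Int.floordiv_eq_ediv_of_pos hc]
  omega

theorem pvClamp_pos (c x : Int) : 0 < pvClamp c x := by
  unfold pvClamp; omega

-- A's running max over clamped values = clamp of the running max
theorem pv_fold_clamp (c : Int) (hc : 0 < c) (t : List Int) (a : Int) :
    t.foldl (fun m x => if pvClamp c x > m then pvClamp c x else m) (pvClamp c a)
      = pvClamp c (t.foldl max a) := by
  induction t generalizing a with
  | nil => rfl
  | cons y t ih =>
    simp only [List.foldl_cons]
    have key : (if pvClamp c y > pvClamp c a then pvClamp c y else pvClamp c a)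
        = pvClamp c (max a y) := by
      rcases le_total a y with h | h
      · have := pvClamp_mono c hc h
        rw [max_eq_right h]; split_ifs <;> omega
      · have := pvClamp_mono c hc h
        rw [max_eq_left h]; split_ifs <;> omega
    rw [key, ih]

-- A's loop over raw candidates = the running max over the filtered, mapped lengths
theorem pv_fold_filter (rcs : List (Int × String × String)) (c m : Int) :
    rcs.foldl (fun m t =>
        if t.2.2 = "" then m
        else
          if pvClamp c ((PySem.Str.len (PySem.Str.strip t.2.2) : Int)) > m
          then pvClamp c ((PySem.Str.len (PySem.Str.strip t.2.2) : Int)) else m) m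
      = ((rcs.filter (fun t => t.2.2 ≠ "")).map
          (fun t => (PySem.Str.len (PySem.Str.strip t.2.2) : Int))).foldl
          (fun m x => if pvClamp c x > m then pvClamp c x else m) m := by
  induction rcs generalizing m with
  | nil => rfl
  | cons h t ih =>
    have hf : (h :: t).filter (fun t => decide (t.2.2 ≠ "")) =
        (if h.2.2 = "" then t.filter (fun t => decide (t.2.2 ≠ ""))
         else h :: t.filter (fun t => decide (t.2.2 ≠ ""))) := by
      by_cases he : h.2.2 = "" <;> simp [he]
    by_cases he : h.2.2 = ""
    · rw [hf, if_pos he, List.foldl_cons]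
      rw [if_pos he]
      exact ih m
    · rw [hf, if_neg he, List.map_cons, List.foldl_cons, List.foldl_cons]
      rw [if_neg he]
      exact ih _

-- thr ≤ running max ↔ some element (or the seed) reaches thr
theorem pv_le_foldl_max (t : List Int) (x thr : Int) :
    thr ≤ t.foldl max x ↔ thr ≤ x ∨ ∃ y ∈ t, thr ≤ y := by
  induction t generalizing x with
  | nil => simp
  | cons y t ih =>
    simp only [List.foldl_cons, ih (max x y), le_max_iff, List.mem_cons]
    constructor
    · rintro ((h | h) | ⟨z, hz, h⟩)
      · exact Or.inl h
      · exact Or.inr ⟨y, Or.inl rfl, h⟩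
      · exact Or.inr ⟨z, Or.inr hz, h⟩
    · rintro (h | ⟨z, rfl | hz, h⟩)
      · exact Or.inl (Or.inl h)
      · exact Or.inl (Or.inr h)
      · exact Or.inr ⟨z, hz, h⟩

-- B's existence test, phrased over the filtered mapped lengths
theorem pv_anyLong_eq (rcs : List (Int × String × String)) (thr : Int) :
    pvAnyLong rcs thr
      = ((rcs.filter (fun t => t.2.2 ≠ "")).map
          (fun t => (PySem.Str.len (PySem.Str.strip t.2.2) : Int))).any
          (fun y => decide (thr ≤ y)) := by
  unfold pvAnyLong
  rw [List.any_map, List.any_filter]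
  rfl

theorem pv_any_cons (t : List Int) (x thr : Int) :
    ((x :: t).any (fun y => decide (thr ≤ y))) = decide (thr ≤ t.foldl max x) := by
  apply Bool.eq_iff_iff.mpr
  rw [decide_eq_true_eq, List.any_eq_true, pv_le_foldl_max]
  constructor
  · rintro ⟨z, hz, h1⟩
    rcases List.mem_cons.mp hz with rfl | hz'
    · exact Or.inl (by simpa using h1)
    · exact Or.inr ⟨z, hz', by simpa using h1⟩
  · rintro (h | ⟨z, hz, h⟩)
    · exact ⟨x, by simp, by simpa⟩
    · exact ⟨z, by simp [hz], by simpa⟩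

-- ===== VERDICT =====
theorem compute_computed_item_height_spec : Claim_equal_compute_computed_item_height := by
  intro rcs w base _
  unfold Spec_compute_computed_item_height compute_computed_item_height compute_computed_item_height_alt
  have hrange : PySem.List.pyRange 6 1 (-1) = [6, 5, 4, 3, 2] := by decide
  set c : Int := max 20 (max 10 (PySem.Int.floordiv w 8)) with hc
  have hcpos : 0 < c := by rw [hc]; omega
  have hfoldA : rcs.foldl (fun m t =>
        if t.2.2 = "" then m
        else
          let display_len : Int := (PySem.Str.len (PySem.Str.strip t.2.2) : Int)
          let lines : Int := min 6 (max 1 (PySem.Int.floordiv display_len c + 1))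
          if lines > m then lines else m) 0
      = ((rcs.filter (fun t => t.2.2 ≠ "")).map
          (fun t => (PySem.Str.len (PySem.Str.strip t.2.2) : Int))).foldl
          (fun m x => if pvClamp c x > m then pvClamp c x else m) 0 := by
    show rcs.foldl (fun m t =>
        if t.2.2 = "" then m
        else
          if pvClamp c ((PySem.Str.len (PySem.Str.strip t.2.2) : Int)) > m
          then pvClamp c ((PySem.Str.len (PySem.Str.strip t.2.2) : Int)) else m) 0 = _
    exact pv_fold_filter rcs c 0
  rw [hrange]
  rcases hl : (rcs.filter (fun t => t.2.2 ≠ "")).map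
      (fun t => (PySem.Str.len (PySem.Str.strip t.2.2) : Int)) with _ | ⟨x, t⟩
  · -- no truthy content: A's max_text_lines is 0, B's search finds nothing
    have hz : ∀ thr : Int, pvAnyLong rcs thr = false := fun thr => by
      rw [pv_anyLong_eq, hl]; rfl
    simp only [List.find?, hz]
    have h0 : (if rcs ≠ [] then rcs.foldl (fun m t =>
        if t.2.2 = "" then m
        else
          let display_len : Int := (PySem.Str.len (PySem.Str.strip t.2.2) : Int)
          let lines : Int := min 6 (max 1 (PySem.Int.floordiv display_len c + 1))
          if lines > m then lines else m) 0 else (0:Int)) = 0 := by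
      by_cases hr : rcs = []
      · simp [hr]
      · rw [if_pos hr, hfoldA, hl]; rfl
    rw [h0]
    norm_num
  · -- some truthy content: reduce both sides to conditions on d = L // c
    have hrcs : rcs ≠ [] := by
      intro h; rw [h] at hl; simp at hl
    rw [if_pos hrcs, hfoldA, hl]
    simp only [List.foldl_cons]
    have h0 : (if pvClamp c x > 0 then pvClamp c x else 0) = pvClamp c x := by
      have := pvClamp_pos c x; split_ifs <;> omega
    rw [h0, pv_fold_clamp c hcpos]
    have ha : ∀ thr : Int, pvAnyLong rcs thr = decide (thr ≤ t.foldl max x) := fun thr => by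
      rw [pv_anyLong_eq, hl, pv_any_cons]
    simp only [List.find?, ha]
    set L : Int := t.foldl max x with hL
    have hdiv : ∀ k : Int, (k ≤ PySem.Int.floordiv L c) ↔ k * c ≤ L := fun k => by
      rw [PySem.Int.floordiv_eq_ediv_of_pos hcpos, Int.le_ediv_iff_mul_le hcpos]
    unfold pvClamp
    have h5 := hdiv 5; have h4 := hdiv 4; have h3 := hdiv 3
    have h2 := hdiv 2; have h1 := hdiv 1
    by_cases g5 : (6 - 1) * c ≤ L <;> by_cases g4 : (5 - 1) * c ≤ L <;>
      by_cases g3 : (4 - 1) * c ≤ L <;> by_cases g2 : (3 - 1) * c ≤ L <;>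
      by_cases g1 : (2 - 1) * c ≤ L <;>
      simp only [g5, g4, g3, g2, g1, decide_true, decide_false] <;>
      split_ifs <;> omega
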